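-- pv_equiv track=rewrite | github.com/chrisgks/ExoCortex-core | tools/workers/process_session.py | intent_review_sections
-- ===== SOURCE A (Python) =====
-- from typing import Any
--
-- def intent_review_sections(entries: list[dict[str, Any]]) -> list[tuple[str, list[dict[str, Any]]]]:
--     ready = [
--         item
--         for item in entries
--         if item.get("review_recommendation") == "confirm_open_loop"
--     ]
--     watch = [
--         item
--         for item in entries
--         if item.get("review_recommendation") == "keep_inferred"
--     ]
--     return [
--         ("## Ready To Confirm As Open Loops", ready),
--         ("## Keep As Inferred Intents", watch),
--     ]
-- ===== SOURCE B (Python) =====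
-- def intent_review_sections(entries):
--     group = {}
--     for item in entries:
--         group.setdefault(item.get("review_recommendation"), []).append(item)
--     return [
--         ("## Ready To Confirm As Open Loops", group.get("confirm_open_loop", [])),
--         ("## Keep As Inferred Intents", group.get("keep_inferred", [])),
--     ]
-- ===== Notes on version B (the rewrite author's own statement) =====
-- stated objective: alternative
-- what changed: Replaces A's two filtered scans of entries with a single forward pass that groups items into a dict keyed by review_recommendation, then reads the two labeled lists out of the table.
import Mathlib
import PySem

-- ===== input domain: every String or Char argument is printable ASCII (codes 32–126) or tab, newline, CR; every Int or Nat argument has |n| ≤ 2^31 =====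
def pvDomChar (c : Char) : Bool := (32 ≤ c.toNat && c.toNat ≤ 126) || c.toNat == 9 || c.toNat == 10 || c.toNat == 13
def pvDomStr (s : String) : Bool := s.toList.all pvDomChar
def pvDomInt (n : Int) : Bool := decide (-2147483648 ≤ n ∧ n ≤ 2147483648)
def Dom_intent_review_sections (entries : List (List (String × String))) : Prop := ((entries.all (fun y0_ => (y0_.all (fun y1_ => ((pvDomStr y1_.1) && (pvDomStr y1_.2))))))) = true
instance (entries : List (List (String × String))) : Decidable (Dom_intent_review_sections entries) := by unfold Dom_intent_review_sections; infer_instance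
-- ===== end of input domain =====

-- B does one grouping pass (a dict keyed by review_recommendation) instead of A's two filtered scans; same result, different traversal.

-- ===== PORT A =====
def intent_review_sections (entries : List (List (String × String))) : List (String × (List (List (String × String)))) :=
  let ready := entries.filter (fun item => (PySem.Dict.mk item).get? "review_recommendation" == some "confirm_open_loop")
  let watch := entries.filter (fun item => (PySem.Dict.mk item).get? "review_recommendation" == some "keep_inferred")
  [("## Ready To Confirm As Open Loops", ready),
   ("## Keep As Inferred Intents", watch)]

-- ===== PORT B =====
def intent_review_sections_alt (entries : List (List (String × String))) : List (String × (List (List (String × String)))) :=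
  let group : PySem.Dict (Option String) (List (List (String × String))) :=
    entries.foldl
      (fun d item => d.modify ((PySem.Dict.mk item).get? "review_recommendation") [] (· ++ [item]))
      PySem.Dict.empty
  [("## Ready To Confirm As Open Loops", group.getD (some "confirm_open_loop") []),
   ("## Keep As Inferred Intents", group.getD (some "keep_inferred") [])]

-- ===== PRECONDITION & SPEC =====
def Spec_intent_review_sections (entries : List (List (String × String))) (out : List (String × (List (List (String × String))))) : Prop := out = intent_review_sections_alt entries
instance (entries : List (List (String × String))) (out : List (String × (List (List (String × String))))) : Decidable (Spec_intent_review_sections entries out) := by unfold Spec_intent_review_sections; infer_instance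

-- ===== CLAIM (what is proved, stated in full; the proofs are below) =====
def Claim_equal_intent_review_sections : Prop := ∀ (entries : List (List (String × String))), Dom_intent_review_sections entries → Spec_intent_review_sections entries (intent_review_sections entries)

-- ===== LEMMAS AND PROOFS =====
theorem group_getD_eq_filter (entries : List (List (String × String))) (c : String) :
    (entries.foldl
      (fun d item => d.modify ((PySem.Dict.mk item).get? "review_recommendation") [] (· ++ [item]))
      PySem.Dict.empty).getD (some c) []
    = entries.filter (fun item => (PySem.Dict.mk item).get? "review_recommendation" == some c) := by
  have h := PySem.Dict.getD_foldl_modify_append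
    (l := entries.map (fun item => ((PySem.Dict.mk item).get? "review_recommendation", item)))
    (d := (PySem.Dict.empty : PySem.Dict (Option String) (List (List (String × String)))))
    (c := some c)
  simp only [List.foldl_map] at h
  simpa [List.filter_map, List.map_map, Function.comp_def] using h

-- ===== VERDICT (by name: the statement is the Claim_ definition above) =====
theorem intent_review_sections_spec : Claim_equal_intent_review_sections := by
  intro entries _
  unfold Spec_intent_review_sections intent_review_sections intent_review_sections_alt
  simp [group_getD_eq_filter]
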